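-- pv_equiv track=rewrite | github.com/cnscheihing/infovis-assignments | examen/parsing/tabular_parser.py | get_coalicion
-- ===== SOURCE A (Python) =====
-- def get_coalicion(partido):
--     coaliciones = {
--         "Frente Amplio": ["PODER", "REVOLUCION DEMOCRATICA", "PARTIDO LIBERAL DE CHILE", "PARTIDO HUMANISTA", "PARTIDO IGUALDAD"],
--         "Chile Vamos": ["RENOVACION NACIONAL", "UNION DEMOCRATA INDEPENDIENTE", "PARTIDO EVOLUCION POLITICA"],
--         "Nueva Mayoría": ["PARTIDO DEMOCRATA CRISTIANO", "PARTIDO POR LA DEMOCRACIA", "PARTIDO SOCIALISTA DE CHILE", "PARTIDO RADICAL SOCIALDEMOCRATA", "PARTIDO COMUNISTA DE CHILE"],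
--         "Independiente": ["INDEPENDIENTE"],
--         "Sumemos": ["AMPLITUD", "PARTIDO CIUDADANOS"],
--         "Yo Marco por el Cambio": ["PARTIDO PROGRESISTA", "DEMOCRACIA REGIONAL PATAGONICA", "PARTIDO PAIS", "FEDERACION REGIONALISTA VERDE SOCIAL"],
--         "Partido Todos (sin coalición)": ["TODOS"],
--         "Partido Unión Patriótica (sin coalición)": ["UNION PATRIOTICA"],
--     }
--     for coalicion, partidos in coaliciones.items():
--         if partido in partidos:
--             return coalicion
--     return "Sin información"
-- ===== SOURCE B (Python) =====
-- _COALICION_POR_PARTIDO = {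
--     "PODER": "Frente Amplio",
--     "REVOLUCION DEMOCRATICA": "Frente Amplio",
--     "PARTIDO LIBERAL DE CHILE": "Frente Amplio",
--     "PARTIDO HUMANISTA": "Frente Amplio",
--     "PARTIDO IGUALDAD": "Frente Amplio",
--     "RENOVACION NACIONAL": "Chile Vamos",
--     "UNION DEMOCRATA INDEPENDIENTE": "Chile Vamos",
--     "PARTIDO EVOLUCION POLITICA": "Chile Vamos",
--     "PARTIDO DEMOCRATA CRISTIANO": "Nueva Mayoría",
--     "PARTIDO POR LA DEMOCRACIA": "Nueva Mayoría",
--     "PARTIDO SOCIALISTA DE CHILE": "Nueva Mayoría",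
--     "PARTIDO RADICAL SOCIALDEMOCRATA": "Nueva Mayoría",
--     "PARTIDO COMUNISTA DE CHILE": "Nueva Mayoría",
--     "INDEPENDIENTE": "Independiente",
--     "AMPLITUD": "Sumemos",
--     "PARTIDO CIUDADANOS": "Sumemos",
--     "PARTIDO PROGRESISTA": "Yo Marco por el Cambio",
--     "DEMOCRACIA REGIONAL PATAGONICA": "Yo Marco por el Cambio",
--     "PARTIDO PAIS": "Yo Marco por el Cambio",
--     "FEDERACION REGIONALISTA VERDE SOCIAL": "Yo Marco por el Cambio",
--     "TODOS": "Partido Todos (sin coalición)",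
--     "UNION PATRIOTICA": "Partido Unión Patriótica (sin coalición)",
-- }
--
-- def get_coalicion(partido):
--     return _COALICION_POR_PARTIDO.get(partido, "Sin información")
-- ===== Notes on version B (the rewrite author's own statement) =====
-- stated objective: idiomatic
-- what changed: The loop scanning every coalition with a list-membership test is replaced by a prebuilt flat party-to-coalition dict and a single .get lookup with a default.
import Mathlib
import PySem

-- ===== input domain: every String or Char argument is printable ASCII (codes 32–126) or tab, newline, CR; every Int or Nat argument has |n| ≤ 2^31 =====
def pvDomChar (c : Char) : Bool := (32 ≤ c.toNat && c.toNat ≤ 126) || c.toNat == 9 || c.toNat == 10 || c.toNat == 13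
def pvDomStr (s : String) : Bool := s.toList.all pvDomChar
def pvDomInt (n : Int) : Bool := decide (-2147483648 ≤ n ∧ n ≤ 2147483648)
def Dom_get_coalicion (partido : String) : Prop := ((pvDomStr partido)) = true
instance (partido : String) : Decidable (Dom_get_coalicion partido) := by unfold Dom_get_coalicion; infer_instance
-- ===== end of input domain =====

-- B replaces the scan over coalitions with a prebuilt flat party→coalition index and a single lookup (idiomatic).


-- ===== PORT A =====
def pvCoalicionesA : List (String × List String) :=
  [("Frente Amplio", ["PODER", "REVOLUCION DEMOCRATICA", "PARTIDO LIBERAL DE CHILE", "PARTIDO HUMANISTA", "PARTIDO IGUALDAD"]),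
   ("Chile Vamos", ["RENOVACION NACIONAL", "UNION DEMOCRATA INDEPENDIENTE", "PARTIDO EVOLUCION POLITICA"]),
   ("Nueva Mayoría", ["PARTIDO DEMOCRATA CRISTIANO", "PARTIDO POR LA DEMOCRACIA", "PARTIDO SOCIALISTA DE CHILE", "PARTIDO RADICAL SOCIALDEMOCRATA", "PARTIDO COMUNISTA DE CHILE"]),
   ("Independiente", ["INDEPENDIENTE"]),
   ("Sumemos", ["AMPLITUD", "PARTIDO CIUDADANOS"]),
   ("Yo Marco por el Cambio", ["PARTIDO PROGRESISTA", "DEMOCRACIA REGIONAL PATAGONICA", "PARTIDO PAIS", "FEDERACION REGIONALISTA VERDE SOCIAL"]),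
   ("Partido Todos (sin coalición)", ["TODOS"]),
   ("Partido Unión Patriótica (sin coalición)", ["UNION PATRIOTICA"])]

-- the for-loop over coaliciones.items(), returning at the first membership hit
def pvLoopA (partido : String) : List (String × List String) → String
  | [] => "Sin información"
  | (coalicion, partidos) :: rest =>
      if partidos.contains partido then coalicion else pvLoopA partido rest

def get_coalicion (partido : String) : String := pvLoopA partido pvCoalicionesA

-- ===== PORT B =====
def pvCoalicionPorPartido : PySem.Dict String String := PySem.Dict.ofList
  [("PODER", "Frente Amplio"),
   ("REVOLUCION DEMOCRATICA", "Frente Amplio"),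
   ("PARTIDO LIBERAL DE CHILE", "Frente Amplio"),
   ("PARTIDO HUMANISTA", "Frente Amplio"),
   ("PARTIDO IGUALDAD", "Frente Amplio"),
   ("RENOVACION NACIONAL", "Chile Vamos"),
   ("UNION DEMOCRATA INDEPENDIENTE", "Chile Vamos"),
   ("PARTIDO EVOLUCION POLITICA", "Chile Vamos"),
   ("PARTIDO DEMOCRATA CRISTIANO", "Nueva Mayoría"),
   ("PARTIDO POR LA DEMOCRACIA", "Nueva Mayoría"),
   ("PARTIDO SOCIALISTA DE CHILE", "Nueva Mayoría"),
   ("PARTIDO RADICAL SOCIALDEMOCRATA", "Nueva Mayoría"),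
   ("PARTIDO COMUNISTA DE CHILE", "Nueva Mayoría"),
   ("INDEPENDIENTE", "Independiente"),
   ("AMPLITUD", "Sumemos"),
   ("PARTIDO CIUDADANOS", "Sumemos"),
   ("PARTIDO PROGRESISTA", "Yo Marco por el Cambio"),
   ("DEMOCRACIA REGIONAL PATAGONICA", "Yo Marco por el Cambio"),
   ("PARTIDO PAIS", "Yo Marco por el Cambio"),
   ("FEDERACION REGIONALISTA VERDE SOCIAL", "Yo Marco por el Cambio"),
   ("TODOS", "Partido Todos (sin coalición)"),
   ("UNION PATRIOTICA", "Partido Unión Patriótica (sin coalición)")]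

def get_coalicion_alt (partido : String) : String :=
  PySem.Dict.getD pvCoalicionPorPartido partido "Sin información"

-- ===== PRECONDITION & SPEC =====
def Spec_get_coalicion (partido : String) (out : String) : Prop := out = get_coalicion_alt partido
instance (partido : String) (out : String) : Decidable (Spec_get_coalicion partido out) := by unfold Spec_get_coalicion; infer_instance

-- ===== CLAIM (what is proved, stated in full; the proofs are below) =====
def Claim_equal_get_coalicion : Prop := ∀ (partido : String), Dom_get_coalicion partido → Spec_get_coalicion partido (get_coalicion partido)

-- ===== LEMMAS AND PROOFS =====

-- the ofList/update chain of B's dict evaluated to its items list (keys are distinct, so it is the literal list)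
theorem pvDict_items_eq : pvCoalicionPorPartido = PySem.Dict.mk
  [("PODER", "Frente Amplio"),
   ("REVOLUCION DEMOCRATICA", "Frente Amplio"),
   ("PARTIDO LIBERAL DE CHILE", "Frente Amplio"),
   ("PARTIDO HUMANISTA", "Frente Amplio"),
   ("PARTIDO IGUALDAD", "Frente Amplio"),
   ("RENOVACION NACIONAL", "Chile Vamos"),
   ("UNION DEMOCRATA INDEPENDIENTE", "Chile Vamos"),
   ("PARTIDO EVOLUCION POLITICA", "Chile Vamos"),
   ("PARTIDO DEMOCRATA CRISTIANO", "Nueva Mayoría"),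
   ("PARTIDO POR LA DEMOCRACIA", "Nueva Mayoría"),
   ("PARTIDO SOCIALISTA DE CHILE", "Nueva Mayoría"),
   ("PARTIDO RADICAL SOCIALDEMOCRATA", "Nueva Mayoría"),
   ("PARTIDO COMUNISTA DE CHILE", "Nueva Mayoría"),
   ("INDEPENDIENTE", "Independiente"),
   ("AMPLITUD", "Sumemos"),
   ("PARTIDO CIUDADANOS", "Sumemos"),
   ("PARTIDO PROGRESISTA", "Yo Marco por el Cambio"),
   ("DEMOCRACIA REGIONAL PATAGONICA", "Yo Marco por el Cambio"),
   ("PARTIDO PAIS", "Yo Marco por el Cambio"),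
   ("FEDERACION REGIONALISTA VERDE SOCIAL", "Yo Marco por el Cambio"),
   ("TODOS", "Partido Todos (sin coalición)"),
   ("UNION PATRIOTICA", "Partido Unión Patriótica (sin coalición)")] := by rfl

-- ===== VERDICT (by name: the statement is the Claim_ definition above) =====
set_option maxHeartbeats 1000000 in
theorem get_coalicion_spec : Claim_equal_get_coalicion := by
  intro p _
  unfold Spec_get_coalicion
  by_cases h1 : p = "PODER"
  · subst h1; rfl
  by_cases h2 : p = "REVOLUCION DEMOCRATICA"
  · subst h2; rfl
  by_cases h3 : p = "PARTIDO LIBERAL DE CHILE"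
  · subst h3; rfl
  by_cases h4 : p = "PARTIDO HUMANISTA"
  · subst h4; rfl
  by_cases h5 : p = "PARTIDO IGUALDAD"
  · subst h5; rfl
  by_cases h6 : p = "RENOVACION NACIONAL"
  · subst h6; rfl
  by_cases h7 : p = "UNION DEMOCRATA INDEPENDIENTE"
  · subst h7; rfl
  by_cases h8 : p = "PARTIDO EVOLUCION POLITICA"
  · subst h8; rfl
  by_cases h9 : p = "PARTIDO DEMOCRATA CRISTIANO"
  · subst h9; rfl
  by_cases h10 : p = "PARTIDO POR LA DEMOCRACIA"
  · subst h10; rfl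
  by_cases h11 : p = "PARTIDO SOCIALISTA DE CHILE"
  · subst h11; rfl
  by_cases h12 : p = "PARTIDO RADICAL SOCIALDEMOCRATA"
  · subst h12; rfl
  by_cases h13 : p = "PARTIDO COMUNISTA DE CHILE"
  · subst h13; rfl
  by_cases h14 : p = "INDEPENDIENTE"
  · subst h14; rfl
  by_cases h15 : p = "AMPLITUD"
  · subst h15; rfl
  by_cases h16 : p = "PARTIDO CIUDADANOS"
  · subst h16; rfl
  by_cases h17 : p = "PARTIDO PROGRESISTA"
  · subst h17; rfl
  by_cases h18 : p = "DEMOCRACIA REGIONAL PATAGONICA"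
  · subst h18; rfl
  by_cases h19 : p = "PARTIDO PAIS"
  · subst h19; rfl
  by_cases h20 : p = "FEDERACION REGIONALISTA VERDE SOCIAL"
  · subst h20; rfl
  by_cases h21 : p = "TODOS"
  · subst h21; rfl
  by_cases h22 : p = "UNION PATRIOTICA"
  · subst h22; rfl
  have g1 : ¬ "PODER" = p := fun e => h1 e.symm
  have g2 : ¬ "REVOLUCION DEMOCRATICA" = p := fun e => h2 e.symm
  have g3 : ¬ "PARTIDO LIBERAL DE CHILE" = p := fun e => h3 e.symm
  have g4 : ¬ "PARTIDO HUMANISTA" = p := fun e => h4 e.symm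
  have g5 : ¬ "PARTIDO IGUALDAD" = p := fun e => h5 e.symm
  have g6 : ¬ "RENOVACION NACIONAL" = p := fun e => h6 e.symm
  have g7 : ¬ "UNION DEMOCRATA INDEPENDIENTE" = p := fun e => h7 e.symm
  have g8 : ¬ "PARTIDO EVOLUCION POLITICA" = p := fun e => h8 e.symm
  have g9 : ¬ "PARTIDO DEMOCRATA CRISTIANO" = p := fun e => h9 e.symm
  have g10 : ¬ "PARTIDO POR LA DEMOCRACIA" = p := fun e => h10 e.symm
  have g11 : ¬ "PARTIDO SOCIALISTA DE CHILE" = p := fun e => h11 e.symm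
  have g12 : ¬ "PARTIDO RADICAL SOCIALDEMOCRATA" = p := fun e => h12 e.symm
  have g13 : ¬ "PARTIDO COMUNISTA DE CHILE" = p := fun e => h13 e.symm
  have g14 : ¬ "INDEPENDIENTE" = p := fun e => h14 e.symm
  have g15 : ¬ "AMPLITUD" = p := fun e => h15 e.symm
  have g16 : ¬ "PARTIDO CIUDADANOS" = p := fun e => h16 e.symm
  have g17 : ¬ "PARTIDO PROGRESISTA" = p := fun e => h17 e.symm
  have g18 : ¬ "DEMOCRACIA REGIONAL PATAGONICA" = p := fun e => h18 e.symm
  have g19 : ¬ "PARTIDO PAIS" = p := fun e => h19 e.symm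
  have g20 : ¬ "FEDERACION REGIONALISTA VERDE SOCIAL" = p := fun e => h20 e.symm
  have g21 : ¬ "TODOS" = p := fun e => h21 e.symm
  have g22 : ¬ "UNION PATRIOTICA" = p := fun e => h22 e.symm
  unfold get_coalicion get_coalicion_alt pvCoalicionesA
  rw [pvDict_items_eq]
  simp [pvLoopA, PySem.Dict.getD, PySem.Dict.get?, List.contains_eq_mem, h1, h2, h3, h4, h5, h6, h7, h8, h9, h10, h11, h12, h13, h14, h15, h16, h17, h18, h19, h20, h21, h22, g1, g2, g3, g4, g5, g6, g7, g8, g9, g10, g11, g12, g13, g14, g15, g16, g17, g18, g19, g20, g21, g22]
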